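-- pv_equiv track=rewrite | github.com/Sabarish-29/phoenix-guardian-v4 | phoenix_guardian/agents/scribe_agent.py | _parse_soap_sections
-- ===== SOURCE A (Python) =====
-- from typing import Any, Dict, List, Optional
--
-- def _parse_soap_sections(soap_note: str) -> Dict[str, str]:
--     """Parse SOAP note into structured sections.
--
--     Extracts individual sections (Subjective, Objective, Assessment,
--     Plan) from the complete SOAP note for structured storage and
--     display in the physician review UI.
--
--     Args:
--         soap_note: Complete SOAP note text from Claude
--
--     Returns:
--         Dictionary with keys: subjective, objective, assessment, plan
--         Each value is the extracted content for that section.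
--     """
--     sections: Dict[str, str] = {
--         "subjective": "",
--         "objective": "",
--         "assessment": "",
--         "plan": "",
--     }
--
--     # Define section markers in order
--     markers = [
--         "SUBJECTIVE:",
--         "OBJECTIVE:",
--         "ASSESSMENT:",
--         "PLAN:",
--         "REASONING:",
--     ]
--
--     # Find section positions
--     positions: Dict[str, int] = {}
--     for marker in markers:
--         pos = soap_note.find(marker)
--         if pos != -1:
--             positions[marker] = pos
--
--     # Sort markers by position
--     sorted_markers = sorted(positions.items(), key=lambda x: x[1])
--
--     # Extract each section
--     for i, (marker, start_pos) in enumerate(sorted_markers):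
--         # Find end position (start of next section or end of text)
--         if i < len(sorted_markers) - 1:
--             end_pos = sorted_markers[i + 1][1]
--         else:
--             end_pos = len(soap_note)
--
--         # Extract section content
--         section_name = marker.replace(":", "").lower()
--         if section_name in sections:
--             content = soap_note[start_pos + len(marker) : end_pos].strip()
--             sections[section_name] = content
--
--     return sections
-- ===== SOURCE B (Python) =====
-- def _parse_soap_sections(soap_note: str):
--     """Same result as A: each section runs from the end of its marker to the
--     nearest later marker occurrence (no sort needed)."""
--     markers = [
--         "SUBJECTIVE:",
--         "OBJECTIVE:",
--         "ASSESSMENT:",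
--         "PLAN:",
--         "REASONING:",
--     ]
--     positions = [soap_note.find(m) for m in markers]
--     sections = {}
--     for marker, pos in zip(markers[:4], positions):
--         key = marker[:-1].lower()
--         if pos == -1:
--             sections[key] = ""
--         else:
--             end = len(soap_note)
--             for p in positions:
--                 if pos < p < end:
--                     end = p
--             sections[key] = soap_note[pos + len(marker):end].strip()
--     return sections
-- ===== Notes on version B (the rewrite author's own statement) =====
-- stated objective: simpler
-- what changed: B drops A's positions-dict, sort and enumerate-with-next-index pass: it computes each of the four sections directly, taking the section end as the minimum marker position greater than the section's own start (a per-section min scan instead of a global sort).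
import Mathlib
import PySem

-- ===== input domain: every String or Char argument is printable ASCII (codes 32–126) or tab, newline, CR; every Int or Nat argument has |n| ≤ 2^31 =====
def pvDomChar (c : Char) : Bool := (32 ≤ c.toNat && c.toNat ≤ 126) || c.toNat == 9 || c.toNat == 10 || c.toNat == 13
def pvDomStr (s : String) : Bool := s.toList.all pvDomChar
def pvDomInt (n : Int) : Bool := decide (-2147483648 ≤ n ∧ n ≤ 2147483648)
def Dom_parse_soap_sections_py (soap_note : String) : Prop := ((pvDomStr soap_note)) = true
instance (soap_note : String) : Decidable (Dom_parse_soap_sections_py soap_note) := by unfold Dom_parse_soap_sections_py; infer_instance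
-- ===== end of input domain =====

-- B replaces A's positions-dict + sort + enumerate-with-next-lookup by a direct pass over the
-- four section markers, computing each section's end as the nearest later marker occurrence (simpler; no sort).

-- ===== PORT A =====
def parse_soap_sections_py (soap_note : String) : List (String × String) :=
  let sections0 : PySem.Dict String String :=
    PySem.Dict.ofList [("subjective", ""), ("objective", ""), ("assessment", ""), ("plan", "")]
  let markers : List String := ["SUBJECTIVE:", "OBJECTIVE:", "ASSESSMENT:", "PLAN:", "REASONING:"]
  -- positions dict: for each marker, first occurrence if present
  let positions : PySem.Dict String Int :=
    markers.foldl (fun d marker =>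
      let pos := PySem.Str.find soap_note marker
      if pos ≠ -1 then d.insert marker pos else d) PySem.Dict.empty
  -- sorted(positions.items(), key=lambda x: x[1])
  let sortedMarkers : List (String × Int) := PySem.List.sorted positions.items (fun x => x.2) false
  let sections : PySem.Dict String String :=
    (PySem.List.enumerate sortedMarkers).foldl (fun d e =>
      let i := e.1
      let marker := e.2.1
      let startPos := e.2.2
      let endPos : Int :=
        if i < PySem.List.len sortedMarkers - 1 then
          (PySem.List.pyGetD sortedMarkers (i + 1) ("", 0)).2
        else PySem.Str.len soap_note
      let sectionName := PySem.Str.lower (PySem.Str.replace marker ":" "")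
      if d.contains sectionName then
        d.insert sectionName
          (PySem.Str.strip (PySem.Str.slice soap_note (some (startPos + PySem.Str.len marker)) (some endPos)))
      else d) sections0
  sections.items

-- ===== PORT B =====
def parse_soap_sections_py_alt (soap_note : String) : List (String × String) :=
  let markers : List String := ["SUBJECTIVE:", "OBJECTIVE:", "ASSESSMENT:", "PLAN:", "REASONING:"]
  let positions : List Int := markers.map (fun m => PySem.Str.find soap_note m)
  let sections : PySem.Dict String String :=
    ((PySem.List.slice markers none (some 4)).zip positions).foldl (fun d mp =>
      let marker := mp.1
      let pos := mp.2
      let key := PySem.Str.lower (PySem.Str.slice marker none (some (-1)))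
      if pos = -1 then d.insert key ""
      else
        let e := positions.foldl (fun e p => if pos < p ∧ p < e then p else e) (PySem.Str.len soap_note)
        d.insert key
          (PySem.Str.strip (PySem.Str.slice soap_note (some (pos + PySem.Str.len marker)) (some e)))
      ) PySem.Dict.empty
  sections.items

-- ===== PRECONDITION & SPEC =====
def Spec_parse_soap_sections_py (soap_note : String) (out : List (String × String)) : Prop := out = parse_soap_sections_py_alt soap_note
instance (soap_note : String) (out : List (String × String)) : Decidable (Spec_parse_soap_sections_py soap_note out) := by unfold Spec_parse_soap_sections_py; infer_instance

-- ===== CLAIM (what is proved, stated in full; the proofs are below) =====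
def Claim_equal_parse_soap_sections_py : Prop := ∀ (soap_note : String), Dom_parse_soap_sections_py soap_note → Spec_parse_soap_sections_py soap_note (parse_soap_sections_py soap_note)

-- ===== LEMMAS AND PROOFS =====

-- Proof-side abbreviations (mirror the two ports' internals)
def pvM : List String := ["SUBJECTIVE:", "OBJECTIVE:", "ASSESSMENT:", "PLAN:", "REASONING:"]
def pvF (s m : String) : Int := PySem.Str.find s m
def pvName (m : String) : String := PySem.Str.lower (PySem.Str.replace m ":" "")
def pvP (s : String) : List (String × Int) :=
  (pvM.filter (fun m => pvF s m ≠ -1)).map (fun m => (m, pvF s m))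
def pvS (s : String) : List (String × Int) := PySem.List.sorted (pvP s) (fun x => x.2) false
def pvEnd (s : String) (p : Int) : Int :=
  (pvM.map (pvF s)).foldl (fun e x => if p < x ∧ x < e then x else e) (PySem.Str.len s)
def pvVal (s m : String) : String :=
  if pvF s m = -1 then ""
  else PySem.Str.strip (PySem.Str.slice s (some (pvF s m + PySem.Str.len m)) (some (pvEnd s (pvF s m))))
def pvD0 : PySem.Dict String String :=
  PySem.Dict.ofList [("subjective", ""), ("objective", ""), ("assessment", ""), ("plan", "")]
def pvNm (e : Int × (String × Int)) : String := PySem.Str.lower (PySem.Str.replace e.2.1 ":" "")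
def pvCt (s : String) (S : List (String × Int)) (e : Int × (String × Int)) : String :=
  PySem.Str.strip (PySem.Str.slice s (some (e.2.2 + PySem.Str.len e.2.1))
    (some (if e.1 < PySem.List.len S - 1 then (PySem.List.pyGetD S (e.1 + 1) ("", 0)).2 else PySem.Str.len s)))
def pvStep (s : String) (S : List (String × Int)) (d : PySem.Dict String String)
    (e : Int × (String × Int)) : PySem.Dict String String :=
  if d.contains (pvNm e) then d.insert (pvNm e) (pvCt s S e) else d
def pvADict (s : String) : PySem.Dict String String :=
  (PySem.List.enumerate (pvS s)).foldl (pvStep s (pvS s)) pvD0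

-- membership through enumerate
lemma pv_mem_enum {α : Type} (l : List α) (s0 : Int) (e : Int × α)
    (h : e ∈ PySem.List.enumerate l s0) : e.2 ∈ l := by
  induction l generalizing s0 with
  | nil => simp [PySem.List.enumerate] at h
  | cons x t ih =>
    rw [PySem.List.enumerate_cons] at h
    rcases List.mem_cons.1 h with h | h
    · subst h; simp
    · exact List.mem_cons_of_mem _ (ih _ h)

-- the five markers: none is a prefix of another, and their names are distinct
lemma pv_nonprefix : ∀ m1 ∈ pvM, ∀ m2 ∈ pvM, m1 ≠ m2 → ¬(m1.toList <+: m2.toList) := by decide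

lemma pv_name_inj : ∀ m1 ∈ pvM, ∀ m2 ∈ pvM, pvName m1 = pvName m2 → m1 = m2 := by decide

-- two distinct markers cannot have the same (existing) first occurrence
lemma pv_find_inj (s : String) : ∀ m1 ∈ pvM, ∀ m2 ∈ pvM, m1 ≠ m2 → 0 ≤ pvF s m1 →
    pvF s m1 = pvF s m2 → False := by
  intro m1 h1 m2 h2 hne hpos heq
  have hpos2 : 0 ≤ pvF s m2 := heq ▸ hpos
  unfold pvF at hpos hpos2 heq
  rw [PySem.Str.find_eq] at hpos hpos2
  rw [PySem.Str.find_eq, PySem.Str.find_eq] at heq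
  obtain ⟨pre1, -⟩ := PySem.Chars.find_spec hpos
  obtain ⟨pre2, -⟩ := PySem.Chars.find_spec hpos2
  rw [← heq] at pre2
  rcases List.prefix_or_prefix_of_prefix pre1 pre2 with h | h
  · exact pv_nonprefix m1 h1 m2 h2 hne h
  · exact pv_nonprefix m2 h2 m1 h1 hne.symm h

-- A's positions-dict fold, characterised
lemma pv_foldIns_items (s : String) :
    ∀ (ms : List String) (d : PySem.Dict String Int), ms.Nodup → (∀ m ∈ ms, d.contains m = false) →
      (ms.foldl (fun d m => if pvF s m ≠ -1 then d.insert m (pvF s m) else d) d).items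
        = d.items ++ (ms.filter (fun m => pvF s m ≠ -1)).map (fun m => (m, pvF s m)) := by
  intro ms
  induction ms with
  | nil => intro d _ _; simp
  | cons m t ih =>
    intro d hnd hcon
    have hndt := (List.nodup_cons.1 hnd).2
    have hm := (List.nodup_cons.1 hnd).1
    simp only [List.foldl_cons, List.filter_cons]
    by_cases hc : pvF s m ≠ -1
    · rw [if_pos hc]
      rw [ih _ hndt ?_]
      · rw [PySem.Dict.items_insert_of_not_contains d _ (hcon m List.mem_cons_self)]
        simp [hc]
      · intro m' hm'
        rw [PySem.Dict.contains_insert]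
        have : m' ≠ m := fun h => hm (h ▸ hm')
        simp [this, hcon m' (List.mem_cons_of_mem _ hm')]
    · rw [if_neg hc, ih _ hndt fun m' hm' => hcon m' (List.mem_cons_of_mem _ hm')]
      simp [hc]

-- pvP facts
lemma pv_mem_P (s : String) (e : String × Int) :
    e ∈ pvP s ↔ e.1 ∈ pvM ∧ pvF s e.1 ≠ -1 ∧ e.2 = pvF s e.1 := by
  simp only [pvP, List.mem_map, List.mem_filter]
  constructor
  · rintro ⟨m, ⟨hmem, hne⟩, rfl⟩
    exact ⟨hmem, by simpa using hne, rfl⟩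
  · rintro ⟨hmem, hne, hsnd⟩
    exact ⟨e.1, ⟨hmem, by simpa using hne⟩, by rw [← hsnd]⟩

lemma pv_P_fst_nodup (s : String) : ((pvP s).map Prod.fst).Nodup := by
  simp only [pvP, List.map_map, Function.comp_def]
  simpa using (show pvM.Nodup by decide).filter _

lemma pv_P_snd_nodup (s : String) : ((pvP s).map Prod.snd).Nodup := by
  simp only [pvP, List.map_map, Function.comp_def]
  apply List.Nodup.map_on
  · intro x hx y hy hxy
    by_contra hne
    have hxM := (List.mem_filter.1 hx)
    have hyM := (List.mem_filter.1 hy)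
    have hge : -1 ≤ pvF s x := by
      unfold pvF; rw [PySem.Str.find_eq]; exact PySem.Chars.neg_one_le_find _ _
    have hx0 : 0 ≤ pvF s x := by
      have : pvF s x ≠ -1 := by simpa using hxM.2
      omega
    exact pv_find_inj s x hxM.1 y hyM.1 hne hx0 hxy
  · exact (show pvM.Nodup by decide).filter _

-- pvS facts
lemma pv_mem_S (s : String) (e : String × Int) : e ∈ pvS s ↔ e ∈ pvP s :=
  PySem.List.mem_sorted _ _ _ _

lemma pv_S_pairwise (s : String) : (pvS s).Pairwise (fun a b => a.2 < b.2) := by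
  have h1 : (pvS s).Pairwise (fun a b => a.2 ≤ b.2) :=
    PySem.List.sorted_pairwise (pvP s) (fun x => x.2)
  have hnd : ((pvS s).map Prod.snd).Nodup := by
    unfold pvS
    rw [((PySem.List.sorted_perm (pvP s) (fun x => x.2) false).map Prod.snd).nodup_iff]
    exact pv_P_snd_nodup s
  have h2 : (pvS s).Pairwise (fun a b => a.2 ≠ b.2) := (List.pairwise_map).1 hnd
  exact (h1.and h2).imp fun h => lt_of_le_of_ne h.1 h.2

lemma pv_S_fst_nodup (s : String) : ((pvS s).map Prod.fst).Nodup := by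
  unfold pvS
  rw [((PySem.List.sorted_perm (pvP s) (fun x => x.2) false).map Prod.fst).nodup_iff]
  exact pv_P_fst_nodup s

-- extraction-fold lemmas
lemma pv_step_contains (s : String) (S : List (String × Int)) :
    ∀ (L : List (Int × (String × Int))) (d : PySem.Dict String String) (k : String),
      ((L.foldl (pvStep s S) d).contains k) = d.contains k := by
  intro L
  induction L with
  | nil => simp
  | cons e t ih =>
    intro d k
    simp only [List.foldl_cons]
    rw [ih]
    unfold pvStep
    split_ifs with h
    · rw [PySem.Dict.contains_insert]
      by_cases hk : k = pvNm e
      · subst hk; simp [h]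
      · simp [hk]
    · rfl

lemma pv_step_keys (s : String) (S : List (String × Int)) :
    ∀ (L : List (Int × (String × Int))) (d : PySem.Dict String String),
      (L.foldl (pvStep s S) d).keys = d.keys := by
  intro L
  induction L with
  | nil => simp
  | cons e t ih =>
    intro d
    simp only [List.foldl_cons]
    rw [ih]
    unfold pvStep
    split_ifs with h
    · exact PySem.Dict.keys_insert_of_contains d _ h
    · rfl

lemma pv_step_get?_none (s : String) (S : List (String × Int)) :
    ∀ (L : List (Int × (String × Int))) (d : PySem.Dict String String) (k : String),
      (∀ e ∈ L, pvNm e ≠ k) → ((L.foldl (pvStep s S) d).get? k) = d.get? k := by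
  intro L
  induction L with
  | nil => simp
  | cons e t ih =>
    intro d k h
    simp only [List.foldl_cons]
    rw [ih _ _ fun e' he' => h e' (List.mem_cons_of_mem _ he')]
    unfold pvStep
    split_ifs with hc
    · exact PySem.Dict.get?_insert_of_ne d _ fun hk => h e (by simp) (by rw [hk])
    · rfl

lemma pv_step_get?_split (s : String) (S : List (String × Int))
    (L1 L2 : List (Int × (String × Int))) (e : Int × (String × Int))
    (d : PySem.Dict String String) (k : String)
    (hc : d.contains k = true) (hn : pvNm e = k) (h2 : ∀ e' ∈ L2, pvNm e' ≠ k) :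
    (((L1 ++ e :: L2).foldl (pvStep s S) d).get? k) = some (pvCt s S e) := by
  rw [List.foldl_append, List.foldl_cons]
  have hct : (L1.foldl (pvStep s S) d).contains (pvNm e) = true := by
    rw [hn, pv_step_contains]; exact hc
  rw [pv_step_get?_none s S L2 _ k h2]
  set d1 := L1.foldl (pvStep s S) d with hd1
  show (pvStep s S d1 e).get? k = _
  unfold pvStep
  rw [if_pos hct, ← hn]
  exact PySem.Dict.get?_insert_self _ _ _

-- min-fold lemmas
lemma pv_foldl_min_const (a : Int) : ∀ (l : List Int), (∀ x ∈ l, a ≤ x) → l.foldl min a = a := by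
  intro l
  induction l with
  | nil => simp
  | cons x t ih => intro h; simp only [List.foldl_cons]
                   rw [min_eq_left (h x (by simp))]
                   exact ih fun y hy => h y (List.mem_cons_of_mem _ hy)

lemma pv_foldl_min_eq (a : Int) : ∀ (l : List Int) (n0 : Int), a ∈ l → (∀ x ∈ l, a ≤ x) → a ≤ n0 →
    l.foldl min n0 = a := by
  intro l
  induction l with
  | nil => simp
  | cons x t ih =>
    intro n0 hmem hle hn
    simp only [List.foldl_cons]
    rcases List.mem_cons.1 hmem with h | h
    · subst h
      rw [min_eq_right hn]
      exact pv_foldl_min_const a t fun y hy => hle y (List.mem_cons_of_mem _ hy)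
    · exact ih _ h (fun y hy => hle y (List.mem_cons_of_mem _ hy))
        (le_min hn (hle x (by simp)))

lemma pv_condmin (p : Int) : ∀ (l : List Int) (n0 : Int),
    l.foldl (fun e x => if p < x ∧ x < e then x else e) n0
      = (l.filter (fun x => p < x)).foldl min n0 := by
  intro l
  induction l with
  | nil => simp
  | cons x t ih =>
    intro n0
    by_cases hp : p < x
    · have hmin : (if p < x ∧ x < n0 then x else n0) = min n0 x := by
        split_ifs with h
        · omega
        · omega
      simp only [List.foldl_cons, List.filter_cons, hp, decide_true, if_true]
      rw [show (if True ∧ x < n0 then x else n0) = min n0 x by simpa [hp] using hmin, ih]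
    · simp only [List.foldl_cons, List.filter_cons, hp, decide_false]
      rw [show (if False ∧ x < n0 then x else n0) = n0 by simp, ih]
      simp

-- every position strictly beyond p lies in the tail of the sorted decomposition
lemma pv_gt_mem_S2 (s : String) (m : String) (p : Int) (S1 S2 : List (String × Int))
    (hS : pvS s = S1 ++ (m, p) :: S2) :
    ∀ x ∈ pvM.map (pvF s), p < x → ∃ e ∈ S2, e.2 = x := by
  intro x hx hpx
  obtain ⟨m', hm', rfl⟩ := List.mem_map.1 hx
  have hmp : (m, p) ∈ pvS s := by rw [hS]; exact List.mem_append_right _ List.mem_cons_self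
  have h0 : 0 ≤ p := by
    obtain ⟨-, hne, hsnd⟩ := (pv_mem_P s _).1 ((pv_mem_S s _).1 hmp)
    have : -1 ≤ pvF s m := by
      unfold pvF; rw [PySem.Str.find_eq]; exact PySem.Chars.neg_one_le_find _ _
    simp only at hsnd hne
    omega
  have hxne : pvF s m' ≠ -1 := by omega
  have hmem : (m', pvF s m') ∈ pvS s := (pv_mem_S s _).2 ((pv_mem_P s _).2 ⟨hm', hxne, rfl⟩)
  have hp := pv_S_pairwise s
  rw [hS] at hmem hp
  obtain ⟨-, -, hp12⟩ := List.pairwise_append.1 hp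
  rcases List.mem_append.1 hmem with h | h
  · exact absurd (hp12 _ h _ List.mem_cons_self) (by simp only; omega)
  · rcases List.mem_cons.1 h with h | h
    · exact absurd (congrArg Prod.snd h) (by simp only; omega)
    · exact ⟨_, h, rfl⟩

lemma pv_end_of_next (s : String) (m : String) (p : Int) (S1 S2' : List (String × Int))
    (q : String × Int) (hS : pvS s = S1 ++ (m, p) :: q :: S2') : pvEnd s p = q.2 := by
  have hq : q ∈ pvS s := by
    rw [hS]; exact List.mem_append_right _ (List.mem_cons_of_mem _ List.mem_cons_self)
  obtain ⟨hqM, hqne, hqsnd⟩ := (pv_mem_P s _).1 ((pv_mem_S s _).1 hq)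
  have hp := pv_S_pairwise s
  rw [hS] at hp
  obtain ⟨-, hp2, -⟩ := List.pairwise_append.1 hp
  obtain ⟨hmq, hpS2⟩ := List.pairwise_cons.1 hp2
  have hpq : p < q.2 := hmq q List.mem_cons_self
  unfold pvEnd
  rw [pv_condmin]
  apply pv_foldl_min_eq
  · rw [List.mem_filter]
    refine ⟨List.mem_map.2 ⟨q.1, hqM, hqsnd.symm⟩, by simpa using hpq⟩
  · intro x hxf
    obtain ⟨hxm, hpx⟩ := List.mem_filter.1 hxf
    obtain ⟨e, he, rfl⟩ := pv_gt_mem_S2 s m p S1 (q :: S2') hS x hxm (by simpa using hpx)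
    rcases List.mem_cons.1 he with h | h
    · rw [h]
    · exact le_of_lt (List.pairwise_cons.1 hpS2 |>.1 e h)
  · rw [PySem.Str.len_eq, hqsnd]
    unfold pvF; rw [PySem.Str.find_eq]
    exact PySem.Chars.find_le_length _ _

lemma pv_end_of_last (s : String) (m : String) (p : Int) (S1 : List (String × Int))
    (hS : pvS s = S1 ++ [(m, p)]) : pvEnd s p = PySem.Str.len s := by
  unfold pvEnd
  rw [pv_condmin]
  have : (pvM.map (pvF s)).filter (fun x => p < x) = [] := by
    rw [List.filter_eq_nil_iff]
    intro x hxm hpx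
    obtain ⟨e, he, rfl⟩ := pv_gt_mem_S2 s m p S1 [] hS x hxm (by simpa using hpx)
    simp at he
  rw [this]
  rfl

-- A's port, re-expressed through the proof-side definitions
lemma pv_A_eq (s : String) : parse_soap_sections_py s = (pvADict s).items := by
  have hpos : (pvM.foldl (fun d m => if pvF s m ≠ -1 then d.insert m (pvF s m) else d)
      PySem.Dict.empty).items = pvP s := by
    rw [pv_foldIns_items s pvM PySem.Dict.empty (by decide)
      (fun m _ => PySem.Dict.contains_empty m)]
    simp [pvP, PySem.Dict.empty]
  simp only [parse_soap_sections_py, pvADict, pvS, pvD0, pvM, pvF] at hpos ⊢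
  rw [← hpos]
  rfl

-- per-marker value of A's final dict
set_option maxHeartbeats 1000000 in
lemma pv_A_get (s : String) (m : String) (hm : m ∈ pvM) (hk : pvD0.contains (pvName m) = true) :
    (pvADict s).get? (pvName m)
      = some (if pvF s m = -1 then "" else pvVal s m) := by
  by_cases hne : pvF s m = -1
  · rw [if_pos hne]
    unfold pvADict
    rw [pv_step_get?_none s (pvS s) _ pvD0 (pvName m) ?_]
    · -- pvD0 value at each of the four section names is ""
      simp only [pvM, List.mem_cons, List.not_mem_nil, or_false] at hm
      rcases hm with rfl | rfl | rfl | rfl | rfl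
      · decide
      · decide
      · decide
      · decide
      · exact absurd hk (by decide)
    · intro e he hEq
      obtain ⟨heM, heF, -⟩ := (pv_mem_P s _).1 ((pv_mem_S s _).1 (pv_mem_enum _ _ _ he))
      have : e.2.1 = m := pv_name_inj _ heM _ hm hEq
      rw [this] at heF
      exact heF hne
  · rw [if_neg hne]
    have hmem : (m, pvF s m) ∈ pvS s := (pv_mem_S s _).2 ((pv_mem_P s _).2 ⟨hm, hne, rfl⟩)
    obtain ⟨S1, S2, hS⟩ := List.append_of_mem hmem
    have hfst := pv_S_fst_nodup s
    rw [hS] at hfst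
    simp only [List.map_append, List.map_cons, List.nodup_append] at hfst
    have hS2 : ∀ e' ∈ PySem.List.enumerate S2 (0 + (S1.length : Int) + 1),
        pvNm e' ≠ pvName m := by
      intro e' he' hEq
      have hmem' : e'.2 ∈ pvS s := by
        rw [hS]
        exact List.mem_append_right _ (List.mem_cons_of_mem _ (pv_mem_enum _ _ _ he'))
      obtain ⟨heM, -, -⟩ := (pv_mem_P s _).1 ((pv_mem_S s _).1 hmem')
      have h1 : e'.2.1 = m := pv_name_inj _ heM _ hm hEq
      have h2 : m ∈ S2.map Prod.fst :=
        h1 ▸ List.mem_map.2 ⟨e'.2, pv_mem_enum _ _ _ he', rfl⟩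
      exact (List.nodup_cons.1 hfst.2.1).1 h2
    have hsplit := pv_step_get?_split s (pvS s) (PySem.List.enumerate S1 0)
      (PySem.List.enumerate S2 (0 + (S1.length : Int) + 1))
      (0 + (S1.length : Int), (m, pvF s m)) pvD0 (pvName m) hk rfl hS2
    rw [hS] at hsplit
    unfold pvADict
    rw [hS, PySem.List.enumerate_append, PySem.List.enumerate_cons]
    rw [hsplit]
    -- the extracted content equals pvVal s m
    simp only [Option.some.injEq, pvCt, pvVal]
    rw [if_neg hne]
    rcases S2 with - | ⟨q, S2'⟩
    · have hlen : PySem.List.len (S1 ++ [(m, pvF s m)]) = (S1.length : Int) + 1 := by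
        rw [PySem.List.len_eq]; simp [List.length_append]; try omega
      rw [if_neg (by rw [hlen]; omega)]
      rw [pv_end_of_last s m (pvF s m) S1 hS]
    · have hlen : PySem.List.len (S1 ++ (m, pvF s m) :: q :: S2') =
          (S1.length : Int) + 2 + (S2'.length : Int) := by
        rw [PySem.List.len_eq]; simp [List.length_append]; try omega
      rw [if_pos (by rw [hlen]; omega)]
      rw [pv_end_of_next s m (pvF s m) S1 S2' q hS]
      have hcast : (0 : Int) + (S1.length : Int) + 1 = ((S1.length + 1 : Nat) : Int) := by
        push_cast; ring
      rw [hcast, PySem.List.pyGetD_natCast]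
      rw [show S1 ++ (m, pvF s m) :: q :: S2' = (S1 ++ [(m, pvF s m)]) ++ q :: S2' by simp]
      rw [List.getD_eq_getElem?_getD, List.getElem?_append_right (by simp)]
      simp


lemma pv_A_keys (s : String) : (pvADict s).keys = ["subjective", "objective", "assessment", "plan"] := by
  unfold pvADict
  rw [pv_step_keys]
  decide

lemma pv_val_if (s m : String) : (if pvF s m = -1 then "" else pvVal s m) = pvVal s m := by
  by_cases h : pvF s m = -1 <;> simp [pvVal, h]

lemma pv_A_items (s : String) : (pvADict s).items
    = [("subjective", pvVal s "SUBJECTIVE:"), ("objective", pvVal s "OBJECTIVE:"),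
       ("assessment", pvVal s "ASSESSMENT:"), ("plan", pvVal s "PLAN:")] := by
  have hkeys := pv_A_keys s
  have h1 := pv_A_get s "SUBJECTIVE:" (by decide) (by decide)
  have h2 := pv_A_get s "OBJECTIVE:" (by decide) (by decide)
  have h3 := pv_A_get s "ASSESSMENT:" (by decide) (by decide)
  have h4 := pv_A_get s "PLAN:" (by decide) (by decide)
  rw [pv_val_if] at h1 h2 h3 h4
  rw [show pvName "SUBJECTIVE:" = "subjective" from by decide] at h1
  rw [show pvName "OBJECTIVE:" = "objective" from by decide] at h2
  rw [show pvName "ASSESSMENT:" = "assessment" from by decide] at h3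
  rw [show pvName "PLAN:" = "plan" from by decide] at h4
  set D := pvADict s with hD
  obtain ⟨items⟩ := D
  have hmap : items.map Prod.fst = ["subjective", "objective", "assessment", "plan"] := hkeys
  rcases items with - | ⟨⟨a1, w1⟩, - | ⟨⟨a2, w2⟩, - | ⟨⟨a3, w3⟩, - | ⟨⟨a4, w4⟩, - | ⟨e5, rest⟩⟩⟩⟩⟩ <;>
    simp at hmap
  obtain ⟨rfl, rfl, rfl, rfl⟩ := hmap
  simp only [PySem.Dict.get?_mk_cons] at h1 h2 h3 h4
  simp only [show (("subjective" : String) == "subjective") = true from by decide,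
    show (("subjective" : String) == "objective") = false from by decide,
    show (("objective" : String) == "objective") = true from by decide,
    show (("subjective" : String) == "assessment") = false from by decide,
    show (("objective" : String) == "assessment") = false from by decide,
    show (("assessment" : String) == "assessment") = true from by decide,
    show (("subjective" : String) == "plan") = false from by decide,
    show (("objective" : String) == "plan") = false from by decide,
    show (("assessment" : String) == "plan") = false from by decide,
    show (("plan" : String) == "plan") = true from by decide,
    if_true, Option.some.injEq] at h1 h2 h3 h4
  simp only [Bool.false_eq_true, if_false, Option.some.injEq] at h2 h3 h4
  simp [h1, h2, h3, h4]

lemma pv_ite_insert (d : PySem.Dict String String) (k : String) (c : Prop) [Decidable c]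
    (a b : String) : (if c then d.insert k a else d.insert k b) = d.insert k (if c then a else b) :=
  (apply_ite (fun v => d.insert k v) c a b).symm

lemma pv_B_eq (s : String) : parse_soap_sections_py_alt s
    = [("subjective", pvVal s "SUBJECTIVE:"), ("objective", pvVal s "OBJECTIVE:"),
       ("assessment", pvVal s "ASSESSMENT:"), ("plan", pvVal s "PLAN:")] := by
  simp only [parse_soap_sections_py_alt]
  rw [show PySem.List.slice ["SUBJECTIVE:", "OBJECTIVE:", "ASSESSMENT:", "PLAN:", "REASONING:"]
      none (some 4) = ["SUBJECTIVE:", "OBJECTIVE:", "ASSESSMENT:", "PLAN:"] from by decide]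
  norm_num [List.map, List.zip, List.zipWith, List.foldl]
  simp only [pv_ite_insert]
  rw [PySem.Dict.items_insert_of_not_contains _ _ ?_,
    PySem.Dict.items_insert_of_not_contains _ _ ?_,
    PySem.Dict.items_insert_of_not_contains _ _ ?_,
    PySem.Dict.items_insert_of_not_contains _ _ ?_]
  · norm_num [pvVal, pvEnd, pvF, pvM, List.map, List.foldl, PySem.Dict.empty,
      show PySem.Str.lower (PySem.Str.slice "SUBJECTIVE:" none (some (-1))) = "subjective" from by decide,
      show PySem.Str.lower (PySem.Str.slice "OBJECTIVE:" none (some (-1))) = "objective" from by decide,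
      show PySem.Str.lower (PySem.Str.slice "ASSESSMENT:" none (some (-1))) = "assessment" from by decide,
      show PySem.Str.lower (PySem.Str.slice "PLAN:" none (some (-1))) = "plan" from by decide]
    and_intros <;> rfl
  all_goals
    simp [PySem.Dict.contains_insert, PySem.Dict.contains_empty,
      show PySem.Str.lower (PySem.Str.slice "SUBJECTIVE:" none (some (-1))) = "subjective" from by decide,
      show PySem.Str.lower (PySem.Str.slice "OBJECTIVE:" none (some (-1))) = "objective" from by decide,
      show PySem.Str.lower (PySem.Str.slice "ASSESSMENT:" none (some (-1))) = "assessment" from by decide,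
      show PySem.Str.lower (PySem.Str.slice "PLAN:" none (some (-1))) = "plan" from by decide]

-- ===== VERDICT (by name: the statement is the Claim_ definition above) =====
theorem parse_soap_sections_py_spec : Claim_equal_parse_soap_sections_py := by
  intro s _
  unfold Spec_parse_soap_sections_py
  rw [pv_A_eq, pv_A_items, pv_B_eq]
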